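-- pv_equiv track=rewrite | github.com/Superpevel/education_practice | main.py | remove_arrs
-- ===== SOURCE A (Python) =====
-- def remove_arrs(dists):
--     dct = {}
--     for dist in dists:
--         if dct.get(len(dist)):
--             dct[len(dist)] = dct[len(dist)] + 1
--         else:
--            dct[len(dist)] = 1
--     dsts = []
--     inverse = [(value, key) for key, value in dct.items()]
--     key = max(inverse)[1]
--     for dist in dists:
--         if len(dist) == key:
--             dsts.append(dist)
--
--     return dsts
-- ===== SOURCE B (Python) =====
-- def remove_arrs(dists):
--     groups = {}
--     for dist in dists:
--         groups.setdefault(len(dist), []).append(dist)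
--     best = max(groups, key=lambda k: (len(groups[k]), k))
--     return groups[best]
-- ===== Notes on version B (the rewrite author's own statement) =====
-- stated objective: simpler
-- what changed: B groups the sublists by length into a dict in one pass and returns the group of the best key (max by (count, length)), replacing A's count dict + item-swapping + separate filter pass over the input.
import Mathlib
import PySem

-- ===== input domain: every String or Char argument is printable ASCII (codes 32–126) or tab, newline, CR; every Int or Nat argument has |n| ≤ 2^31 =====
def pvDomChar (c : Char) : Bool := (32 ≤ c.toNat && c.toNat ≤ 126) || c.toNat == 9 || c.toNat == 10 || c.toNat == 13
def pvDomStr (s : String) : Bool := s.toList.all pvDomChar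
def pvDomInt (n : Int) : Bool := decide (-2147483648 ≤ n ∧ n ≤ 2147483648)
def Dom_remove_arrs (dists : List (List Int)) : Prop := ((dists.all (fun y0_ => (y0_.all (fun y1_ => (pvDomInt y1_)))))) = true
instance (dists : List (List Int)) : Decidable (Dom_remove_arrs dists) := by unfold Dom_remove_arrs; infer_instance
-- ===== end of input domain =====

-- B groups the sublists by length in one dict pass and returns the best group (max by (count, length));
-- simpler than A's count dict + swapped-items max + separate filter pass. A = B on every nonempty input.


-- ===== PORT A =====
-- the counting loop: `if dct.get(len(dist)): dct[len] = dct[len] + 1 else: dct[len] = 1`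
def removeArrsCountStep (d : PySem.Dict Int Int) (dist : List Int) : PySem.Dict Int Int :=
  match d.get? ((dist.length : Int)) with
  | some v => if v ≠ 0 then d.insert ((dist.length : Int)) (v + 1)
              else d.insert ((dist.length : Int)) 1
  | none => d.insert ((dist.length : Int)) 1

def remove_arrs (dists : List (List Int)) : List (List Int) :=
  let dct : PySem.Dict Int Int := dists.foldl removeArrsCountStep PySem.Dict.empty
  let inverse : List (Int × Int) := dct.items.map (fun p => (p.2, p.1))
  -- key = max(inverse)[1]; Python raises ValueError on empty `inverse` (excluded by Pre_)
  match PySem.List.max2? inverse (fun p => p.1) (fun p => p.2) with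
  | none => []
  | some m =>
      dists.foldl (fun dsts dist => if ((dist.length : Int)) == m.2 then dsts ++ [dist] else dsts) []

-- ===== PORT B =====
def remove_arrs_alt (dists : List (List Int)) : List (List Int) :=
  let groups : PySem.Dict Int (List (List Int)) :=
    dists.foldl (fun g dist => g.modify ((dist.length : Int)) [] (fun l => l ++ [dist])) PySem.Dict.empty
  -- best = max(groups, key=lambda k: (len(groups[k]), k)); ValueError on empty (excluded by Pre_)
  match PySem.List.max2? groups.keys (fun k => ((groups.getD k []).length : Int)) (fun k => k) with
  | none => []
  | some best => groups.getD best []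

-- ===== PRECONDITION & SPEC =====
-- Python A raises ValueError (max of an empty sequence) on the empty list; B raises there too.
def Pre_remove_arrs (dists : List (List Int)) : Prop := dists ≠ []
instance (dists : List (List Int)) : Decidable (Pre_remove_arrs dists) := by unfold Pre_remove_arrs; infer_instance
def pvWitness_remove_arrs : List (List Int) := [[1], [2, 3]]

def Spec_remove_arrs (dists : List (List Int)) (out : List (List Int)) : Prop := out = remove_arrs_alt dists
instance (dists : List (List Int)) (out : List (List Int)) : Decidable (Spec_remove_arrs dists out) := by unfold Spec_remove_arrs; infer_instance

-- ===== CLAIM (what is proved, stated in full; the proofs are below) =====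
def Claim_equal_remove_arrs : Prop := ∀ (dists : List (List Int)), Dom_remove_arrs dists → Pre_remove_arrs dists → Spec_remove_arrs dists (remove_arrs dists)

-- ===== LEMMAS AND PROOFS =====

-- A's counting loop is the standard counter loop, because every stored count is positive.
theorem removeArrsCount_eq_counter (dists : List (List Int)) (d : PySem.Dict Int Int)
    (h : ∀ p ∈ d.items, 0 < p.2) :
    dists.foldl removeArrsCountStep d
      = (dists.map (fun x => ((x.length : Int)))).foldl (fun d k => d.insert k (d.getD k 0 + 1)) d := by
  induction dists generalizing d with
  | nil => simp
  | cons x t ih =>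
    have hstep : removeArrsCountStep d x = d.insert ((x.length : Int)) (d.getD ((x.length : Int)) 0 + 1) := by
      unfold removeArrsCountStep
      cases hg : d.get? ((x.length : Int)) with
      | none => simp [PySem.Dict.getD_of_get?_eq_none d 0 hg]
      | some v =>
        have hv : 0 < v := h _ (PySem.Dict.mem_items_of_get?_eq_some d hg)
        rw [PySem.Dict.getD_of_get?_eq_some d 0 hg]
        simp [hv.ne']
    have hinv : ∀ p ∈ (d.insert ((x.length : Int)) (d.getD ((x.length : Int)) 0 + 1)).items, 0 < p.2 := by
      intro p hp
      rcases (PySem.Dict.mem_items_insert d _ _ p).1 hp with hpe | ⟨hpd, _⟩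
      · have hge : 0 ≤ d.getD ((x.length : Int)) 0 := by
          rcases hg : d.get? ((x.length : Int)) with _ | v
          · simp [PySem.Dict.getD_of_get?_eq_none d 0 hg]
          · have := h _ (PySem.Dict.mem_items_of_get?_eq_some d hg)
            simp only [PySem.Dict.getD_of_get?_eq_some d 0 hg]
            simpa using by omega
        rw [hpe]; simpa using by omega
      · exact h _ hpd
    simp only [List.foldl_cons, List.map_cons, hstep]
    exact ih _ hinv

-- max2? over a mapped list is max2? with composed keys.
theorem max2?_map {α β : Type} (xs : List α) (f : α → β) (k1 : β → Int) (k2 : β → Int) :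
    PySem.List.max2? (xs.map f) k1 k2 = (PySem.List.max2? xs (fun x => k1 (f x)) (fun x => k2 (f x))).map f := by
  unfold PySem.List.max2?
  rw [List.foldl_map]
  have : ∀ (a : Option α),
      xs.foldl (fun acc x =>
        match acc with
        | none => some (f x)
        | some m => if (decide (k1 m < k1 (f x)) || !decide (k1 (f x) < k1 m) && decide (k2 m < k2 (f x))) = true then some (f x) else some m)
        (a.map f)
      = (xs.foldl (fun acc x =>
          match acc with
          | none => some x
          | some m => if (decide (k1 (f m) < k1 (f x)) || !decide (k1 (f x) < k1 (f m)) && decide (k2 (f m) < k2 (f x))) = true then some x else some m)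
          a).map f := by
    intro a
    induction xs generalizing a with
    | nil => simp
    | cons y t ih =>
      cases a with
      | none => simpa using ih (some y)
      | some m =>
        simp only [List.foldl_cons, Option.map_some]
        split_ifs with hc
        · simpa using ih (some y)
        · simpa using ih (some m)
  simpa using this none

-- B's groups dict: lookup is the filter of the input by length.
theorem groups_getD (dists : List (List Int)) (k : Int) :
    ((dists.foldl (fun g dist => g.modify ((dist.length : Int)) [] (fun l => l ++ [dist])) PySem.Dict.empty).getD k [])
      = dists.filter (fun x => ((x.length : Int)) == k) := by
  have h1 : dists.foldl (fun g dist => g.modify ((dist.length : Int)) [] (fun l => l ++ [dist])) PySem.Dict.empty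
      = (dists.map (fun x => (((x.length : Int)), x))).foldl (fun d p => d.modify p.1 [] (fun l => l ++ [p.2])) PySem.Dict.empty := by
    rw [List.foldl_map]
  rw [h1, PySem.Dict.getD_foldl_modify_append]
  simp [List.filter_map, Function.comp_def]

-- B's groups dict: keys are the distinct lengths in first-occurrence order.
theorem groups_keys (dists : List (List Int)) :
    ((dists.foldl (fun g dist => g.modify ((dist.length : Int)) [] (fun l => l ++ [dist])) PySem.Dict.empty).keys)
      = PySem.Set.ofList (dists.map (fun x => ((x.length : Int)))) := by
  rw [PySem.Dict.keys_foldl_modify_key]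
  simp [PySem.Set.ofList, PySem.Set.update, PySem.Dict.keys_empty]

-- ===== VERDICT (by name: the statement is the Claim_ definition above) =====
theorem remove_arrs_spec : Claim_equal_remove_arrs := by
  intro dists _ _
  unfold Spec_remove_arrs remove_arrs remove_arrs_alt
  simp only []
  set L := dists.map (fun x => ((x.length : Int))) with hL
  have hdct : dists.foldl removeArrsCountStep PySem.Dict.empty = PySem.Dict.counter L := by
    rw [removeArrsCount_eq_counter dists PySem.Dict.empty (by simp [PySem.Dict.empty])]
    exact PySem.Dict.foldl_insert_getD_add_one_eq_counter L
  have hinv : (dists.foldl removeArrsCountStep PySem.Dict.empty).items.map (fun p => (p.2, p.1))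
      = (PySem.Set.ofList L).map (fun k => ((L.count k : Int), k)) := by
    rw [hdct, PySem.Dict.items_counter]
    simp [List.map_map, Function.comp_def]
  have hcount : ∀ k : Int, (((dists.foldl (fun g dist => g.modify ((dist.length : Int)) [] (fun l => l ++ [dist])) PySem.Dict.empty).getD k []).length : Int)
      = ((L.count k : Int)) := by
    intro k
    rw [groups_getD]
    congr 1
    simp [hL, List.count_eq_countP, List.countP_map, Function.comp_def]
    exact Eq.symm List.countP_eq_length_filter
  rw [hinv, groups_keys,
    max2?_map (PySem.Set.ofList L) (fun k => ((L.count k : Int), k)) (fun p => p.1) (fun p => p.2)]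
  have hk : (fun k => (((dists.foldl (fun g dist => g.modify ((dist.length : Int)) [] (fun l => l ++ [dist])) PySem.Dict.empty).getD k []).length : Int))
      = (fun k : Int => ((L.count k : Int))) := funext hcount
  rw [hk]
  cases hmx : PySem.List.max2? (PySem.Set.ofList L) (fun k : Int => ((L.count k : Int))) (fun k : Int => k) with
  | none => simp
  | some best =>
    simp only [Option.map_some]
    rw [PySem.List.foldl_append_if (fun x => ((x.length : Int)) == best) (fun x => x) dists [],
      groups_getD]
    simp
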